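-- pv_equiv track=rewrite | github.com/aceiii/advent-of-code-2021 | python/day16.py | parse_literal_value
-- ===== SOURCE A (Python) =====
-- def parse_literal_value(bits):
--     offset = 0
--     value_bits = []
--     stop = False
--     while not stop:
--         group = bits[offset:offset+5]
--         prefix = group[0]
--         value_bits.append(group[1:])
--         offset += 5
--         stop = prefix == "0"
--
--     return int("".join(value_bits), 2), offset
-- ===== SOURCE B (Python) =====
-- def parse_literal_value(bits):
--     i = 0
--     while bits[5 * i] == "1":
--         i += 1
--     value_bits = [bits[5 * j + 1 : 5 * j + 5] for j in range(i + 1)]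
--     return int("".join(value_bits), 2), 5 * (i + 1)
-- ===== Notes on version B (the rewrite author's own statement) =====
-- stated objective: alternative
-- what changed: B replaces A's single fused accumulate-while loop with two phases: a prefix-only scan that locates the stop group, then a slice comprehension extracting the 4-bit payloads.
-- outside the precondition, e.g. on parse_literal_value('0 111'): A returns (7, 5), B returns (7, 5); on parse_literal_value('101112011100111'): A returns (1911, 15), B returns (119, 10); on parse_literal_value('0'): A raises ValueError, B raises ValueError
import Mathlib
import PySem

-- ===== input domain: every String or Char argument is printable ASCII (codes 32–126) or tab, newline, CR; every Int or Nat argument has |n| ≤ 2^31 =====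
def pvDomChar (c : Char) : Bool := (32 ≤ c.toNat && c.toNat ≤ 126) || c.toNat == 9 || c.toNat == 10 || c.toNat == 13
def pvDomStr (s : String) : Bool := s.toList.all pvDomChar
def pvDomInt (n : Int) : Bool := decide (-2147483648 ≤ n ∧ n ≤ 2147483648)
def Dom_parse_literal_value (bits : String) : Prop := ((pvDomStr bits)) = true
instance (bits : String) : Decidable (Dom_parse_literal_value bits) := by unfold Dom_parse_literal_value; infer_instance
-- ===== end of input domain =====

-- B splits A's fused accumulate-while loop into a prefix-only stop scan plus a slice comprehension; same cost, different decomposition.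


-- ===== PORT A =====
-- int(s, 2): exact for nonempty strings of '0'/'1' digits — the domain Pre_ restricts to.
def pvBinVal (cs : List Char) : Int :=
  cs.foldl (fun a c => 2 * a + (if c = '1' then 1 else 0)) 0

-- A's while loop; fuel makes it total (fuel-out / empty group = Python's IndexError, excluded by Pre_).
def pvLoopA : List Char → Nat → Nat → List (List Char) → Int × Int
  | _, 0, _, _ => (0, 0)
  | l, fuel + 1, offset, acc =>
    let group := PySem.List.slice l (some (offset : Int)) (some ((offset : Int) + 5))
    match group with
    | [] => (0, 0)  -- group[0] raises IndexError here
    | p :: rest =>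
      let acc2 := acc ++ [rest]  -- group[1:]
      if p = '0' then (pvBinVal acc2.flatten, ((offset + 5 : Nat) : Int))
      else pvLoopA l fuel (offset + 5) acc2

def parse_literal_value (bits : String) : Int × Int :=
  pvLoopA bits.toList (bits.toList.length + 1) 0 []

-- ===== PORT B =====
-- phase 1: scan only the group-prefix bits for the first '0' (out-of-range = IndexError in Python, excluded by Pre_).
def pvFindStop : List Char → Nat → Nat → Nat
  | _, 0, i => i
  | l, fuel + 1, i => if l.getD (5 * i) ' ' = '1' then pvFindStop l fuel (i + 1) else i

def parse_literal_value_alt (bits : String) : Int × Int :=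
  let l := bits.toList
  let i := pvFindStop l (l.length + 1) 0
  let value_bits := (List.range (i + 1)).map
    (fun j => PySem.List.slice l (some ((5 * j + 1 : Nat) : Int)) (some ((5 * j + 5 : Nat) : Int)))
  (pvBinVal value_bits.flatten, ((5 * (i + 1) : Nat) : Int))

-- ===== PRECONDITION & SPEC =====
-- Pre_ excludes inputs whose scanned region contains characters other than '0'/'1' (there A's
-- continue-on-any-non-'0' prefix and int(...,2)'s whitespace tolerance give accidental values B's
-- prefix test does not reproduce) and inputs with no reachable in-range stop group (A raises
-- IndexError, or ValueError on the one-character string "0").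
def Pre_parse_literal_value (bits : String) : Prop :=
  ∃ i < bits.toList.length,
    (∀ j < i, bits.toList.getD (5 * j) ' ' = '1') ∧
    bits.toList.getD (5 * i) ' ' = '0' ∧ 5 * i < bits.toList.length ∧
    (0 < i ∨ 2 ≤ bits.toList.length) ∧
    (∀ p < 5 * (i + 1), p < bits.toList.length →
      (bits.toList.getD p ' ' = '0' ∨ bits.toList.getD p ' ' = '1'))
instance (bits : String) : Decidable (Pre_parse_literal_value bits) := by
  unfold Pre_parse_literal_value; infer_instance

def pvWitness_parse_literal_value : String := "01111"

def Spec_parse_literal_value (bits : String) (out : Int × Int) : Prop := out = parse_literal_value_alt bits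
instance (bits : String) (out : Int × Int) : Decidable (Spec_parse_literal_value bits out) := by
  unfold Spec_parse_literal_value; infer_instance

-- ===== CLAIM (what is proved, stated in full; the proofs are below) =====
def Claim_equal_parse_literal_value : Prop := ∀ (bits : String), Dom_parse_literal_value bits → Pre_parse_literal_value bits → Spec_parse_literal_value bits (parse_literal_value bits)

-- ===== LEMMAS AND PROOFS =====

lemma pv_loopA_eq (l : List Char) (i : Nat)
    (hstop : l.getD (5 * i) ' ' = '0') (hlt : 5 * i < l.length)
    (hpre : ∀ j < i, l.getD (5 * j) ' ' = '1') :
    ∀ fuel k acc, k ≤ i → i - k < fuel →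
      pvLoopA l fuel (5 * k) acc =
        (pvBinVal (acc ++ (List.range' k (i + 1 - k)).map
            (fun j => (l.drop (5 * j + 1)).take 4)).flatten,
         ((5 * (i + 1) : Nat) : Int)) := by
  intro fuel
  induction fuel with
  | zero => intro k acc hk hf; omega
  | succ n ih =>
    intro k acc hk hf
    have h5k : 5 * k < l.length := by omega
    have hgroup : PySem.List.slice l (some ((5 * k : Nat) : Int)) (some (((5 * k : Nat) : Int) + 5)) =
        l[5 * k] :: (l.drop (5 * k + 1)).take 4 := by
      have hcast : (((5 * k : Nat) : Int) + 5) = ((5 * k + 5 : Nat) : Int) := by push_cast; ring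
      rw [hcast, PySem.List.slice_natCast, show 5 * k + 5 - 5 * k = 5 from by omega,
        List.drop_eq_getElem_cons h5k]
      rfl
    rcases Nat.lt_or_ge k i with h | h
    · have hp : l[5 * k] = '1' := by
        have := hpre k h
        rwa [List.getD_eq_getElem _ _ (by omega)] at this
      simp only [pvLoopA, hgroup, hp]
      rw [if_neg (by decide)]
      rw [show 5 * k + 5 = 5 * (k + 1) from by ring,
        ih (k + 1) (acc ++ [(l.drop (5 * k + 1)).take 4]) (by omega) (by omega)]
      rw [show List.range' k (i + 1 - k) = k :: List.range' (k + 1) (i + 1 - (k + 1)) from by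
        rw [show i + 1 - k = (i + 1 - (k + 1)) + 1 from by omega, List.range'_succ]]
      simp
    · have hki : k = i := le_antisymm hk h
      have hp : l[5 * k] = '0' := by
        have := hstop
        rw [← hki] at this
        rwa [List.getD_eq_getElem _ _ (by omega)] at this
      simp only [pvLoopA, hgroup, hp]
      simp only [if_true]
      rw [hki]
      rw [show i + 1 - i = 1 from by omega, show 5 * i + 5 = 5 * (i + 1) from by ring]
      simp [List.range']

lemma pv_findStop_eq (l : List Char) (i : Nat)
    (hstop : l.getD (5 * i) ' ' = '0')
    (hpre : ∀ j < i, l.getD (5 * j) ' ' = '1') :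
    ∀ fuel k, k ≤ i → i - k < fuel → pvFindStop l fuel k = i := by
  intro fuel
  induction fuel with
  | zero => intro k hk hf; omega
  | succ n ih =>
    intro k hk hf
    rcases Nat.lt_or_ge k i with h | h
    · rw [show pvFindStop l (n + 1) k =
          (if l.getD (5 * k) ' ' = '1' then pvFindStop l n (k + 1) else k) from rfl,
        hpre k h, if_pos rfl]
      exact ih (k + 1) (by omega) (by omega)
    · have hki : k = i := le_antisymm hk h
      rw [show pvFindStop l (n + 1) k =
          (if l.getD (5 * k) ' ' = '1' then pvFindStop l n (k + 1) else k) from rfl,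
        hki, hstop, if_neg (by decide)]

-- ===== VERDICT (by name: the statement is the Claim_ definition above) =====
theorem parse_literal_value_spec : Claim_equal_parse_literal_value := by
  intro bits _ hpre
  obtain ⟨i, hilen, hpref, hstop, hlt, -, -⟩ := hpre
  show parse_literal_value bits = parse_literal_value_alt bits
  have hF := pv_findStop_eq bits.toList i hstop hpref (bits.toList.length + 1) 0 (by omega) (by omega)
  have hA := pv_loopA_eq bits.toList i hstop hlt hpref (bits.toList.length + 1) 0 [] (by omega) (by omega)
  have h4 : ∀ j : Nat, 5 * j + 5 - (5 * j + 1) = 4 := fun j => by omega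
  have hsl : ∀ j : Nat, PySem.List.slice bits.toList (some (5 * (j : Int) + 1)) (some (5 * (j : Int) + 5)) =
      (bits.toList.drop (5 * j + 1)).take 4 := by
    intro j
    rw [show (5 * (j : Int) + 1) = ((5 * j + 1 : Nat) : Int) from by push_cast; ring,
      show (5 * (j : Int) + 5) = ((5 * j + 5 : Nat) : Int) from by push_cast; ring,
      PySem.List.slice_natCast, h4 j]
  unfold parse_literal_value parse_literal_value_alt
  dsimp only
  rw [hF, show pvLoopA bits.toList (bits.toList.length + 1) 0 [] = _ from hA]
  simp [hsl, List.range_eq_range']
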